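-- pv_equiv track=rewrite | github.com/Alvaropz/Python_problems_BinarySearch | 2. Medium/count_of_sublists_with_same_first_and_last_values/count_of_sublists_with_same_first_and_last_values.py | count_of_sublists_with_same_first_and_last_values
-- ===== SOURCE A (Python) =====
-- def count_of_sublists_with_same_first_and_last_values(nums):
--     dict_nums = {}
--     total = 0
--     for number in nums:
--         if number in dict_nums:
--             dict_nums[number] += 1
--         else:
--             dict_nums[number] = 1
--         total += dict_nums[number]
--     return total
-- ===== SOURCE B (Python) =====
-- def count_of_sublists_with_same_first_and_last_values(nums):
--     counts = {}
--     for x in nums: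
--         counts[x] = counts.get(x, 0) + 1
--     return sum(c * (c + 1) // 2 for c in counts.values())
-- ===== Notes on version B (the rewrite author's own statement) =====
-- stated objective: simpler
-- what changed: B builds a complete frequency table first and then sums the closed-form triangular number c*(c+1)//2 per distinct value, instead of A's interleaved per-element accumulation of running counts.
import Mathlib
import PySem

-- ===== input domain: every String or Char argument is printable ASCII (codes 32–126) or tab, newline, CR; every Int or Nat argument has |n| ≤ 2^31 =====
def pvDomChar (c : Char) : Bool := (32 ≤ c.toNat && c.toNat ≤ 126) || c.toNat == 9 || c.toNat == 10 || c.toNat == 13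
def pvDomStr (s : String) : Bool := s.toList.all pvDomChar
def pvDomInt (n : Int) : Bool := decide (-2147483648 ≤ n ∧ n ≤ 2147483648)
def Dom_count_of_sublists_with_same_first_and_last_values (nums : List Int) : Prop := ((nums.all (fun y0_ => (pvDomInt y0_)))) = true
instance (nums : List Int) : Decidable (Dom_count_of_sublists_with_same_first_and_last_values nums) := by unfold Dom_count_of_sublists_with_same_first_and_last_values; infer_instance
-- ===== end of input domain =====

-- B builds the frequency table first and then sums the closed form c*(c+1)//2 per
-- distinct value, instead of A's interleaved per-element running-count accumulation (simpler).

-- ===== PORT A =====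
-- literal port of A: one loop carrying (dict_nums, total);
-- 'dict_nums[number] += 1' / 'dict_nums[number] = 1' are the two insert branches,
-- 'total += dict_nums[number]' reads the freshly written value.
def count_of_sublists_with_same_first_and_last_values (nums : List Int) : Int :=
  (nums.foldl
    (fun (st : PySem.Dict Int Int × Int) number =>
      let d := if st.1.contains number
                 then st.1.insert number (st.1.getD number 0 + 1)
                 else st.1.insert number 1
      (d, st.2 + d.getD number 0))
    (PySem.Dict.empty, 0)).2

-- ===== PORT B =====
-- literal port of Source B: build counts with get(x,0)+1, then sum c*(c+1)//2 over the values.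
def count_of_sublists_with_same_first_and_last_values_alt (nums : List Int) : Int :=
  ((nums.foldl (fun (counts : PySem.Dict Int Int) x => counts.insert x (counts.getD x 0 + 1))
      PySem.Dict.empty).values.map (fun c => PySem.Int.floordiv (c * (c + 1)) 2)).sum

-- ===== PRECONDITION & SPEC =====
def Spec_count_of_sublists_with_same_first_and_last_values (nums : List Int) (out : Int) : Prop := out = count_of_sublists_with_same_first_and_last_values_alt nums
instance (nums : List Int) (out : Int) : Decidable (Spec_count_of_sublists_with_same_first_and_last_values nums out) := by unfold Spec_count_of_sublists_with_same_first_and_last_values; infer_instance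

-- ===== CLAIM (what is proved, stated in full; the proofs are below) =====
def Claim_equal_count_of_sublists_with_same_first_and_last_values : Prop := ∀ (nums : List Int), Dom_count_of_sublists_with_same_first_and_last_values nums → Spec_count_of_sublists_with_same_first_and_last_values nums (count_of_sublists_with_same_first_and_last_values nums)

-- ===== LEMMAS AND PROOFS =====

-- the triangular-number term, and the mathematical value both ports compute
def pvTri (c : Int) : Int := PySem.Int.floordiv (c * (c + 1)) 2

def pvS (q : List Int) : Int :=
  ((PySem.Set.ofList q).map (fun v => pvTri ((q.count v : Nat) : Int))).sum

theorem pvTri_succ (c : Int) (_hc : 0 ≤ c) : pvTri (c + 1) = pvTri c + (c + 1) := by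
  obtain ⟨k, hk⟩ := Int.even_mul_succ_self c
  have h1 : c * (c + 1) = 2 * k := by omega
  have h2 : (c + 1) * (c + 1 + 1) = 2 * (k + c + 1) := by ring_nf; ring_nf at h1; omega
  unfold pvTri
  rw [PySem.Int.floordiv_eq_ediv_of_pos (by omega), PySem.Int.floordiv_eq_ediv_of_pos (by omega),
      h1, h2, Int.mul_ediv_cancel_left _ (by omega), Int.mul_ediv_cancel_left _ (by omega)]
  omega

-- sum over a nodup list when exactly one element's term changes
theorem pv_sum_map_update (l : List Int) (hl : l.Nodup) (x : Int) (hx : x ∈ l)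
    (f g : Int → Int) (hfg : ∀ v ∈ l, v ≠ x → g v = f v) :
    (l.map g).sum = (l.map f).sum + (g x - f x) := by
  induction l with
  | nil => cases hx
  | cons a t ih =>
    rcases List.mem_cons.mp hx with rfl | hxt
    · have : ∀ v ∈ t, g v = f v := by
        intro v hv
        exact hfg v (List.mem_cons_of_mem _ hv) (by rintro rfl; exact (List.nodup_cons.mp hl).1 hv)
      simp only [List.map_cons, List.sum_cons]
      rw [List.map_congr_left this]; ring
    · have ha : a ≠ x := by rintro rfl; exact (List.nodup_cons.mp hl).1 hxt
      simp only [List.map_cons, List.sum_cons]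
      rw [hfg a (List.mem_cons_self) ha,
          ih (List.nodup_cons.mp hl).2 hxt (fun v hv => hfg v (List.mem_cons_of_mem _ hv))]
      ring

theorem pvS_append_singleton (p : List Int) (x : Int) :
    pvS (p ++ [x]) = pvS p + ((p.count x : Nat) : Int) + 1 := by
  have hset : PySem.Set.ofList (p ++ [x]) = PySem.Set.add (PySem.Set.ofList p) x := by
    simp [PySem.Set.ofList_eq_foldl, List.foldl_append]
  by_cases hx : x ∈ p
  · have hadd : PySem.Set.add (PySem.Set.ofList p) x = PySem.Set.ofList p := by
      simp [PySem.Set.add, PySem.Set.contains, PySem.Set.mem_ofList, hx]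
    unfold pvS
    rw [hset, hadd,
        pv_sum_map_update (PySem.Set.ofList p) (PySem.Set.nodup_ofList p) x
          ((PySem.Set.mem_ofList _ _).mpr hx)
          (fun v => pvTri ((p.count v : Nat) : Int))
          (fun v => pvTri (((p ++ [x]).count v : Nat) : Int))
          (by
            intro v _ hvx
            have hxv : x ≠ v := Ne.symm hvx
            simp [List.count_append, hxv])]
    have hc : (((p ++ [x]).count x : Nat) : Int) = ((p.count x : Nat) : Int) + 1 := by
      simp [List.count_append]
    rw [hc, pvTri_succ _ (by positivity)]
    ring
  · have hadd : PySem.Set.add (PySem.Set.ofList p) x = PySem.Set.ofList p ++ [x] := by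
      simp [PySem.Set.add, PySem.Set.contains, PySem.Set.mem_ofList, hx]
    unfold pvS
    rw [hset, hadd, List.map_append, List.sum_append]
    have hcx : (p ++ [x]).count x = p.count x + 1 := by simp [List.count_append]
    have hpx : p.count x = 0 := List.count_eq_zero.mpr hx
    have htail : ([x].map (fun v => pvTri (((p ++ [x]).count v : Nat) : Int))).sum = 1 := by
      simp [hpx, pvTri, PySem.Int.floordiv]
    have hhead : (PySem.Set.ofList p).map (fun v => pvTri (((p ++ [x]).count v : Nat) : Int))
        = (PySem.Set.ofList p).map (fun v => pvTri ((p.count v : Nat) : Int)) := by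
      apply List.map_congr_left
      intro v hv
      have hxv : x ≠ v := by rintro rfl; exact hx ((PySem.Set.mem_ofList _ _).mp hv)
      simp [List.count_append, hxv]
    rw [htail, hhead, hpx]
    simp

-- A's dict branch is exactly the counter-building insert step
theorem pvA_step_dict (d : PySem.Dict Int Int) (x : Int) :
    (if d.contains x then d.insert x (d.getD x 0 + 1) else d.insert x 1)
      = d.insert x (d.getD x 0 + 1) := by
  by_cases h : d.contains x = true
  · simp [h]
  · have h0 : d.getD x 0 = 0 :=
      PySem.Dict.getD_of_not_contains d 0 (by simpa using h)
    simp [h, h0]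

-- the dict built by the counting inserts
def pvDA (p : List Int) : PySem.Dict Int Int :=
  p.foldl (fun d x => d.insert x (d.getD x 0 + 1)) PySem.Dict.empty

theorem pvDA_getD (p : List Int) (v : Int) :
    (pvDA p).getD v 0 = ((p.count v : Nat) : Int) := by
  rw [pvDA, PySem.Dict.foldl_insert_getD_add_one_eq_counter, PySem.Dict.getD_counter]

-- A's loop invariant: starting from (pvDA p, pvS p) and consuming l yields
-- (pvDA (p ++ l), pvS (p ++ l)).
theorem pvA_loop (l p : List Int) :
    l.foldl
      (fun (st : PySem.Dict Int Int × Int) number =>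
        let d := if st.1.contains number
                   then st.1.insert number (st.1.getD number 0 + 1)
                   else st.1.insert number 1
        (d, st.2 + d.getD number 0))
      (pvDA p, pvS p)
    = (pvDA (p ++ l), pvS (p ++ l)) := by
  induction l generalizing p with
  | nil => simp
  | cons x t ih =>
    simp only [List.foldl_cons]
    have hd : (if (pvDA p).contains x
                 then (pvDA p).insert x ((pvDA p).getD x 0 + 1)
                 else (pvDA p).insert x 1)
        = pvDA (p ++ [x]) := by
      rw [pvA_step_dict]
      simp [pvDA, List.foldl_append]
    have hget : (pvDA (p ++ [x])).getD x 0 = ((p.count x : Nat) : Int) + 1 := by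
      rw [pvDA_getD]; simp [List.count_append]
    rw [show (p ++ x :: t) = (p ++ [x]) ++ t by simp]
    rw [← ih (p ++ [x])]
    simp only [hd, hget]
    congr 1
    rw [pvS_append_singleton]
    ring

theorem pvA_eq_S (nums : List Int) :
    count_of_sublists_with_same_first_and_last_values nums = pvS nums := by
  have h := pvA_loop nums []
  have h0 : pvS ([] : List Int) = 0 := by simp [pvS, PySem.Set.ofList]
  rw [h0] at h
  unfold count_of_sublists_with_same_first_and_last_values
  have hda : pvDA ([] : List Int) = PySem.Dict.empty := rfl
  rw [hda] at h
  rw [h]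
  simp

theorem pvB_eq_S (nums : List Int) :
    count_of_sublists_with_same_first_and_last_values_alt nums = pvS nums := by
  unfold count_of_sublists_with_same_first_and_last_values_alt
  rw [PySem.Dict.foldl_insert_getD_add_one_eq_counter,
      PySem.Dict.values_eq_map_keys _ (PySem.Dict.nodup_keys_counter nums) 0,
      PySem.Dict.keys_counter]
  unfold pvS pvTri
  rw [List.map_map]
  congr 1
  apply List.map_congr_left
  intro v _
  simp [PySem.Dict.getD_counter]

-- ===== VERDICT (by name: the statement is the Claim_ definition above) =====
theorem count_of_sublists_with_same_first_and_last_values_spec : Claim_equal_count_of_sublists_with_same_first_and_last_values := by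
  intro nums _
  unfold Spec_count_of_sublists_with_same_first_and_last_values
  rw [pvA_eq_S, pvB_eq_S]
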